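-- pv_equiv track=rewrite | github.com/SanglierKevin/Dingomini-Solver | main.py | checkOblique
-- ===== SOURCE A (Python) =====
-- def checkOblique(game,cards):
--     if cards == 4:
--         obl1 = [game[0][0][0][0],game[0][0][1][1],game[1][1][0][0],game[1][1][1][1]]
--         obl2 = [game[1][0][1][0],game[1][0][0][1],game[0][1][1][0],game[0][1][0][1]]
--
--         while len(obl1) != 1:
--             if obl1[0] != 0 and obl1[0] in obl1[1:]:
--                 return False
--             obl1 = obl1[1:]
--
--         while len(obl2) != 1:
--             if obl2[0] != 0 and obl2[0] in obl2[1:]: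
--                 return False
--             obl2 = obl2[1:]
--
--     elif cards == 6:
--         obl3 = [game[0][0][0][0],game[0][0][1][1],game[1][1][0][0],game[1][1][1][1]]
--         obl4 = [game[0][1][0][0],game[0][1][1][1],game[1][2][0][0],game[1][2][1][1]]
--         obl5 = [game[1][0][1][0],game[1][0][0][1],game[0][1][1][0],game[0][1][0][1]]
--         obl6 = [game[1][1][1][0],game[1][1][0][1],game[0][2][1][0],game[0][2][0][1]]
--
--         while len(obl3) != 1:
--             if obl3[0] != 0 and obl3[0] in obl3[1:]:
--                 return False
--             obl3 = obl3[1:]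
--
--         while len(obl4) != 1:
--             if obl4[0] != 0 and obl4[0] in obl4[1:]:
--                 return False
--             obl4 = obl4[1:]
--
--         while len(obl5) != 1:
--             if obl5[0] != 0 and obl5[0] in obl5[1:]:
--                 return False
--             obl5 = obl5[1:]
--
--         while len(obl6) != 1:
--             if obl6[0] != 0 and obl6[0] in obl6[1:]:
--                 return False
--             obl6 = obl6[1:]
--
--     elif cards == 9:
--         obl7 = [game[0][0][0][0],game[0][0][1][1],game[1][1][0][0],game[1][1][1][1],game[2][2][0][0],game[2][2][1][1]]
--         obl8 = [game[2][0][1][0],game[2][0][0][1],game[1][1][1][0],game[1][1][0][1],game[0][2][1][0],game[0][2][0][1]]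
--
--         while len(obl7) != 1:
--             if obl7[0] != 0 and obl7[0] in obl7[1:]:
--                 return False
--             obl7 = obl7[1:]
--
--         while len(obl8) != 1:
--             if obl8[0] != 0 and obl8[0] in obl8[1:]:
--                 return False
--             obl8 = obl8[1:]
--
--     return True
-- ===== SOURCE B (Python) =====
-- def _noDupNonzero(diag):
--     nz = sorted(v for v in diag if v != 0)
--     return all(a != b for a, b in zip(nz, nz[1:]))
--
-- _IDX = {
--     4: [[(0,0,0,0),(0,0,1,1),(1,1,0,0),(1,1,1,1)],
--         [(1,0,1,0),(1,0,0,1),(0,1,1,0),(0,1,0,1)]],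
--     6: [[(0,0,0,0),(0,0,1,1),(1,1,0,0),(1,1,1,1)],
--         [(0,1,0,0),(0,1,1,1),(1,2,0,0),(1,2,1,1)],
--         [(1,0,1,0),(1,0,0,1),(0,1,1,0),(0,1,0,1)],
--         [(1,1,1,0),(1,1,0,1),(0,2,1,0),(0,2,0,1)]],
--     9: [[(0,0,0,0),(0,0,1,1),(1,1,0,0),(1,1,1,1),(2,2,0,0),(2,2,1,1)],
--         [(2,0,1,0),(2,0,0,1),(1,1,1,0),(1,1,0,1),(0,2,1,0),(0,2,0,1)]],
-- }
--
-- def checkOblique(game, cards):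
--     for idxs in _IDX.get(cards, []):
--         diag = [game[i][j][k][l] for (i, j, k, l) in idxs]
--         if not _noDupNonzero(diag):
--             return False
--     return True
-- ===== Notes on version B (the rewrite author's own statement) =====
-- stated objective: alternative
-- what changed: Duplicate detection is done by sorting each diagonal's nonzero values and checking adjacent pairs for equality instead of A's shrinking-window membership scans, and the diagonals are produced data-driven from an index table keyed by cards instead of A's repeated inline while-loop blocks.
import Mathlib
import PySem

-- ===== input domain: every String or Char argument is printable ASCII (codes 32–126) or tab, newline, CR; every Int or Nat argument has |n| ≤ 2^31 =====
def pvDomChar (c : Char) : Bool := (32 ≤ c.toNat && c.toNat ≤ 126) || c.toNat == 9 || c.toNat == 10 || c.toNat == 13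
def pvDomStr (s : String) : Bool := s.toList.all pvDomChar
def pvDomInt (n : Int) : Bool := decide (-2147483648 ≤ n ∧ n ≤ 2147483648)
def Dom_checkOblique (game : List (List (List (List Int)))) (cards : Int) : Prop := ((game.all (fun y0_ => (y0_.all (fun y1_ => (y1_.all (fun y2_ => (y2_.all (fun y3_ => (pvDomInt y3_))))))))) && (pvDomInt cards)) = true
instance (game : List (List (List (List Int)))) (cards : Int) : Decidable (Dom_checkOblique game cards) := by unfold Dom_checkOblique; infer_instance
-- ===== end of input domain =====

-- B detects duplicates by sorting each diagonal's nonzero values and checking adjacent pairs,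
-- with the diagonals built data-driven from an index table (objective: alternative).


-- game[i][j][k][l] as an Option (none = IndexError); shared by both ports and Pre_
def pvCell (game : List (List (List (List Int)))) (i j k l : Nat) : Option Int :=
  (((getElem? game i).bind (fun a => getElem? a j)).bind (fun b => getElem? b k)).bind (fun c => getElem? c l)

-- total getter; exact under Pre_checkOblique (Python raises IndexError exactly where pvCell is none)
def pvG (game : List (List (List (List Int)))) (i j k l : Nat) : Int :=
  (pvCell game i j k l).getD 0

-- ===== PORT A =====
-- A's 'while len(obl) != 1: if obl[0] != 0 and obl[0] in obl[1:]: return False; obl = obl[1:]'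
def pvScanA : List Int → Bool
  | [] => true          -- unreachable: A's obl lists are nonempty literals
  | [_] => true
  | x :: y :: ys => if x ≠ 0 ∧ (y :: ys).contains x then false else pvScanA (y :: ys)

def checkOblique (game : List (List (List (List Int)))) (cards : Int) : Bool :=
  let g := pvG game
  if cards = 4 then
    let obl1 := [g 0 0 0 0, g 0 0 1 1, g 1 1 0 0, g 1 1 1 1]
    let obl2 := [g 1 0 1 0, g 1 0 0 1, g 0 1 1 0, g 0 1 0 1]
    pvScanA obl1 && pvScanA obl2
  else if cards = 6 then
    let obl3 := [g 0 0 0 0, g 0 0 1 1, g 1 1 0 0, g 1 1 1 1]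
    let obl4 := [g 0 1 0 0, g 0 1 1 1, g 1 2 0 0, g 1 2 1 1]
    let obl5 := [g 1 0 1 0, g 1 0 0 1, g 0 1 1 0, g 0 1 0 1]
    let obl6 := [g 1 1 1 0, g 1 1 0 1, g 0 2 1 0, g 0 2 0 1]
    pvScanA obl3 && pvScanA obl4 && pvScanA obl5 && pvScanA obl6
  else if cards = 9 then
    let obl7 := [g 0 0 0 0, g 0 0 1 1, g 1 1 0 0, g 1 1 1 1, g 2 2 0 0, g 2 2 1 1]
    let obl8 := [g 2 0 1 0, g 2 0 0 1, g 1 1 1 0, g 1 1 0 1, g 0 2 1 0, g 0 2 0 1]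
    pvScanA obl7 && pvScanA obl8
  else
    true

-- ===== PORT B =====
-- all(a != b for a, b in zip(nz, nz[1:]))
def pvAdjDistinct : List Int → Bool
  | [] => true
  | [_] => true
  | a :: b :: r => (a ≠ b : Bool) && pvAdjDistinct (b :: r)

-- sorted(v for v in diag if v != 0), then adjacent comparison
def pvNoDupNonzero (diag : List Int) : Bool :=
  pvAdjDistinct (PySem.List.sorted (diag.filter (fun v => v ≠ 0)) (fun x => x) false)

-- the _IDX table of Source B
def pvIdxTable (cards : Int) : List (List (Nat × Nat × Nat × Nat)) :=
  if cards = 4 then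
    [[(0,0,0,0),(0,0,1,1),(1,1,0,0),(1,1,1,1)],
     [(1,0,1,0),(1,0,0,1),(0,1,1,0),(0,1,0,1)]]
  else if cards = 6 then
    [[(0,0,0,0),(0,0,1,1),(1,1,0,0),(1,1,1,1)],
     [(0,1,0,0),(0,1,1,1),(1,2,0,0),(1,2,1,1)],
     [(1,0,1,0),(1,0,0,1),(0,1,1,0),(0,1,0,1)],
     [(1,1,1,0),(1,1,0,1),(0,2,1,0),(0,2,0,1)]]
  else if cards = 9 then
    [[(0,0,0,0),(0,0,1,1),(1,1,0,0),(1,1,1,1),(2,2,0,0),(2,2,1,1)],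
     [(2,0,1,0),(2,0,0,1),(1,1,1,0),(1,1,0,1),(0,2,1,0),(0,2,0,1)]]
  else []

def checkOblique_alt (game : List (List (List (List Int)))) (cards : Int) : Bool :=
  (pvIdxTable cards).all (fun idxs =>
    pvNoDupNonzero (idxs.map (fun t => pvG game t.1 t.2.1 t.2.2.1 t.2.2.2)))

-- ===== PRECONDITION & SPEC =====
-- index tuples A accesses for each cards value
def pvIdx4 : List (Nat × Nat × Nat × Nat) :=
  [(0,0,0,0),(0,0,1,1),(1,1,0,0),(1,1,1,1),(1,0,1,0),(1,0,0,1),(0,1,1,0),(0,1,0,1)]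
def pvIdx6 : List (Nat × Nat × Nat × Nat) :=
  pvIdx4 ++ [(0,1,0,0),(0,1,1,1),(1,2,0,0),(1,2,1,1),(1,1,1,0),(1,1,0,1),(0,2,1,0),(0,2,0,1)]
def pvIdx9 : List (Nat × Nat × Nat × Nat) :=
  [(0,0,0,0),(0,0,1,1),(1,1,0,0),(1,1,1,1),(2,2,0,0),(2,2,1,1),
   (2,0,1,0),(2,0,0,1),(1,1,1,0),(1,1,0,1),(0,2,1,0),(0,2,0,1)]

-- Pre_ excludes exactly the inputs on which Python A raises IndexError: when cards is 4/6/9,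
-- every grid position A indexes must exist.
def Pre_checkOblique (game : List (List (List (List Int)))) (cards : Int) : Prop :=
  (cards = 4 → pvIdx4.all (fun t => (pvCell game t.1 t.2.1 t.2.2.1 t.2.2.2).isSome)) ∧
  (cards = 6 → pvIdx6.all (fun t => (pvCell game t.1 t.2.1 t.2.2.1 t.2.2.2).isSome)) ∧
  (cards = 9 → pvIdx9.all (fun t => (pvCell game t.1 t.2.1 t.2.2.1 t.2.2.2).isSome))

instance (game : List (List (List (List Int)))) (cards : Int) : Decidable (Pre_checkOblique game cards) := by
  unfold Pre_checkOblique; infer_instance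

def pvWitness_checkOblique : List (List (List (List Int))) × Int :=
  ([[[[1, 0], [0, 2]], [[3, 0], [0, 4]]],
    [[[5, 0], [0, 6]], [[7, 0], [0, 8]]]], 4)

def Spec_checkOblique (game : List (List (List (List Int)))) (cards : Int) (out : Bool) : Prop := out = checkOblique_alt game cards
instance (game : List (List (List (List Int)))) (cards : Int) (out : Bool) : Decidable (Spec_checkOblique game cards out) := by unfold Spec_checkOblique; infer_instance

-- ===== CLAIM (what is proved, stated in full; the proofs are below) =====
def Claim_equal_checkOblique : Prop := ∀ (game : List (List (List (List Int)))) (cards : Int), Dom_checkOblique game cards → Pre_checkOblique game cards → Spec_checkOblique game cards (checkOblique game cards)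

-- ===== LEMMAS AND PROOFS =====

theorem pvCountCons (x z : Int) (l : List Int) : l.count z ≤ (x :: l).count z := by
  rw [List.count_cons]; split <;> omega

-- A's scan returns false exactly when some nonzero value occurs at least twice
theorem pvScanA_false_iff (l : List Int) :
    pvScanA l = false ↔ ∃ x ∈ l, x ≠ 0 ∧ 2 ≤ l.count x := by
  induction l with
  | nil => simp [pvScanA]
  | cons x xs ih =>
    cases xs with
    | nil => simp [pvScanA, List.count_cons]
    | cons y ys =>
      rw [pvScanA]
      split_ifs with h
      · obtain ⟨hx0, hmem⟩ := h
        simp only [List.contains_eq_mem, decide_eq_true_eq] at hmem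
        have h1 : 1 ≤ (y :: ys).count x := List.one_le_count_iff.mpr hmem
        simp only [true_iff]
        exact ⟨x, List.mem_cons_self, hx0, by rw [List.count_cons_self]; omega⟩
      · rw [ih]
        constructor
        · rintro ⟨z, hz, hz0, hc⟩
          refine ⟨z, List.mem_cons_of_mem _ hz, hz0, ?_⟩
          have := pvCountCons x z (y :: ys)
          omega
        · rintro ⟨z, hz, hz0, hc⟩
          rcases List.mem_cons.mp hz with rfl | hzmem
          · exfalso
            apply h
            refine ⟨hz0, ?_⟩
            simp only [List.contains_eq_mem, decide_eq_true_eq]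
            rw [List.count_cons_self] at hc
            exact List.one_le_count_iff.mp (by omega)
          · refine ⟨z, hzmem, hz0, ?_⟩
            by_cases hzx : z = x
            · subst hzx
              exact absurd ⟨hz0, by
                simp only [List.contains_eq_mem, decide_eq_true_eq]; exact hzmem⟩ h
            · rw [List.count_cons_of_ne (fun e => hzx e.symm)] at hc
              exact hc

theorem pvAdjDistinct_iff_chain (l : List Int) :
    pvAdjDistinct l = true ↔ List.IsChain (· ≠ ·) l := by
  induction l with
  | nil => simp [pvAdjDistinct]
  | cons a t ih =>
    cases t with
    | nil => simp [pvAdjDistinct]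
    | cons b r =>
      rw [pvAdjDistinct, Bool.and_eq_true, ih, List.isChain_cons_cons, decide_eq_true_eq,
        and_comm]

theorem pvChain_lt (l : List Int) (hs : l.Pairwise (· ≤ ·))
    (hc : List.IsChain (· ≠ ·) l) : l.Pairwise (· < ·) := by
  induction l with
  | nil => exact List.Pairwise.nil
  | cons a t ih =>
    cases t with
    | nil => simp
    | cons b r =>
      rw [List.isChain_cons_cons] at hc
      obtain ⟨hab, hc'⟩ := hc
      obtain ⟨hale, hs'⟩ := List.pairwise_cons.mp hs
      have ihp := ih hs' hc'
      exact List.Pairwise.cons_cons_of_trans (lt_of_le_of_ne (hale b List.mem_cons_self) hab) ihp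

-- on a ≤-sorted list, adjacent distinctness is exactly Nodup
theorem pvAdjDistinct_sorted_iff_nodup (l : List Int) (hs : l.Pairwise (· ≤ ·)) :
    pvAdjDistinct l = true ↔ l.Nodup := by
  rw [pvAdjDistinct_iff_chain]
  constructor
  · intro hc
    exact (pvChain_lt l hs hc).imp (fun h => ne_of_lt h)
  · intro hn
    exact hn.isChain

theorem pvNoDupNonzero_iff (d : List Int) :
    pvNoDupNonzero d = true ↔ ¬ ∃ x ∈ d, x ≠ 0 ∧ 2 ≤ d.count x := by
  unfold pvNoDupNonzero
  set f := d.filter (fun v => decide (v ≠ 0)) with hf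
  have hperm : (PySem.List.sorted f (fun x => x) false).Perm f := PySem.List.sorted_perm f _ _
  have hpw : (PySem.List.sorted f (fun x => x) false).Pairwise (· ≤ ·) :=
    PySem.List.sorted_pairwise f (fun x => x)
  rw [pvAdjDistinct_sorted_iff_nodup _ hpw, hperm.nodup_iff, List.nodup_iff_count_le_one]
  constructor
  · rintro h ⟨x, hx, hx0, hc⟩
    have hcc : f.count x = d.count x := by
      rw [hf]; exact List.count_filter (by simp [hx0])
    have := h x
    omega
  · intro h x
    by_contra hc
    rw [not_le] at hc
    have hxf : x ∈ f := List.one_le_count_iff.mp (by omega)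
    have hx0 : x ≠ 0 := by
      have := List.of_mem_filter hxf
      simpa using this
    have hxd : x ∈ d := List.mem_of_mem_filter hxf
    have hcc : f.count x = d.count x := by
      rw [hf]; exact List.count_filter (by simp [hx0])
    exact h ⟨x, hxd, hx0, by omega⟩

theorem pvScanA_eq_noDup (d : List Int) : pvScanA d = pvNoDupNonzero d := by
  rcases hb : pvNoDupNonzero d with _ | _
  · have hne : ¬ pvNoDupNonzero d = true := by rw [hb]; simp
    have := (not_iff_not.mpr (pvNoDupNonzero_iff d)).mp hne
    obtain ⟨x, hx, hx0, hc⟩ := not_not.mp this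
    exact (pvScanA_false_iff d).mpr ⟨x, hx, hx0, hc⟩
  · have hnd := (pvNoDupNonzero_iff d).mp hb
    cases hs : pvScanA d
    · exact absurd ((pvScanA_false_iff d).mp hs) hnd
    · rfl

-- ===== VERDICT (by name: the statement is the Claim_ definition above) =====
theorem checkOblique_spec : Claim_equal_checkOblique := by
  intro game cards _ _
  unfold Spec_checkOblique checkOblique checkOblique_alt pvIdxTable
  split_ifs with h4 h6 h9 <;>
    simp [List.all, pvScanA_eq_noDup, Bool.and_assoc]
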